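-- pv_equiv track=rewrite | github.com/zyond26/Practise_ICPC | ICPC_m_trung/G.py | count_shared_cells
-- ===== SOURCE A (Python) =====
-- def count_shared_cells(M, N, p, q):
--     row_start = max(1, p - 1)
--     row_end = min(M, p + 1)
--     col_start = max(1, q - 1)
--     col_end = min(N, q + 1)
--
--     count = 0
--     for i in range(row_start, row_end + 1):
--         for j in range(col_start, col_end + 1):
--             if i == p and j == q:
--                 continue
--             count += 1
--
--     return count
-- ===== SOURCE B (Python) =====
-- def count_shared_cells(M, N, p, q):
--     row_start = max(1, p - 1)
--     row_end = min(M, p + 1)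
--     col_start = max(1, q - 1)
--     col_end = min(N, q + 1)
--     rows = max(0, row_end - row_start + 1)
--     cols = max(0, col_end - col_start + 1)
--     total = rows * cols
--     if 1 <= p <= M and 1 <= q <= N:
--         total -= 1
--     return total
-- ===== Notes on version B (the rewrite author's own statement) =====
-- stated objective: simpler
-- what changed: Replaced the 3x3 double loop with a closed-form computation: rows*cols of the clipped neighborhood minus 1 when the center (p,q) lies inside the M x N grid.
import Mathlib
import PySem

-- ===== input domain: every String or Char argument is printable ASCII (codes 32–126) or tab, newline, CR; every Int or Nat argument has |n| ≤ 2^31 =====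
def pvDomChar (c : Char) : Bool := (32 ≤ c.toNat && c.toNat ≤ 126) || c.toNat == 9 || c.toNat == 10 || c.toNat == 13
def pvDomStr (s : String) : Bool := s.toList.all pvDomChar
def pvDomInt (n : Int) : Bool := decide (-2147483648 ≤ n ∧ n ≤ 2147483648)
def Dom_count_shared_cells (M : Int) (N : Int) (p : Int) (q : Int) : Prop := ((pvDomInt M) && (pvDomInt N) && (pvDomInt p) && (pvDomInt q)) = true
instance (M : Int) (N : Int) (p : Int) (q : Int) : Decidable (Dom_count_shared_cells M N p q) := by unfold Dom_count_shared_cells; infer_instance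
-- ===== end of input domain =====

-- B replaces A's 3x3 double loop with a closed-form clipped-area computation (objective: simpler).

-- ===== PORT A =====
def count_shared_cells (M : Int) (N : Int) (p : Int) (q : Int) : Int :=
  let row_start := max 1 (p - 1)
  let row_end := min M (p + 1)
  let col_start := max 1 (q - 1)
  let col_end := min N (q + 1)
  (PySem.List.pyRange row_start (row_end + 1) 1).foldl
    (fun count i =>
      (PySem.List.pyRange col_start (col_end + 1) 1).foldl
        (fun c j => if i = p ∧ j = q then c else c + 1) count) 0

-- ===== PORT B =====
def count_shared_cells_alt (M : Int) (N : Int) (p : Int) (q : Int) : Int :=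
  let row_start := max 1 (p - 1)
  let row_end := min M (p + 1)
  let col_start := max 1 (q - 1)
  let col_end := min N (q + 1)
  let rows := max 0 (row_end - row_start + 1)
  let cols := max 0 (col_end - col_start + 1)
  let total := rows * cols
  if 1 ≤ p ∧ p ≤ M ∧ 1 ≤ q ∧ q ≤ N then total - 1 else total

-- ===== PRECONDITION & SPEC =====
def Spec_count_shared_cells (M : Int) (N : Int) (p : Int) (q : Int) (out : Int) : Prop := out = count_shared_cells_alt M N p q
instance (M : Int) (N : Int) (p : Int) (q : Int) (out : Int) : Decidable (Spec_count_shared_cells M N p q out) := by unfold Spec_count_shared_cells; infer_instance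

-- ===== CLAIM (what is proved, stated in full; the proofs are below) =====
def Claim_equal_count_shared_cells : Prop := ∀ (M : Int) (N : Int) (p : Int) (q : Int), Dom_count_shared_cells M N p q → Spec_count_shared_cells M N p q (count_shared_cells M N p q)

-- ===== LEMMAS AND PROOFS =====

theorem inner_fold_eq (p q ca cb : Int) (i : Int) : ∀ (a : Int) (c0 : Int),
    (PySem.List.pyRange a cb 1).foldl (fun c j => if i = p ∧ j = q then c else c + 1) c0
      = c0 + max 0 (cb - a) - (if i = p ∧ a ≤ q ∧ q < cb then 1 else 0) := by
  intro a c0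
  by_cases h : cb ≤ a
  · rw [PySem.List.pyRange_one_eq_nil h]
    simp only [List.foldl_nil]
    split_ifs <;> omega
  · push Not at h
    have hlt : ((cb - (a+1)).toNat) < ((cb - a).toNat) := by omega
    rw [PySem.List.pyRange_one_cons h, List.foldl_cons]
    rw [inner_fold_eq p q ca cb i (a+1)]
    split_ifs <;> omega
termination_by a _ => (cb - a).toNat

theorem outer_fold_eq (p q ca cb : Int) : ∀ (a b : Int) (c0 : Int),
    (PySem.List.pyRange a b 1).foldl
      (fun count i =>
        (PySem.List.pyRange ca cb 1).foldl (fun c j => if i = p ∧ j = q then c else c + 1) count) c0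
      = c0 + max 0 (b - a) * max 0 (cb - ca)
          - (if a ≤ p ∧ p < b ∧ ca ≤ q ∧ q < cb then 1 else 0) := by
  intro a b c0
  by_cases h : b ≤ a
  · rw [PySem.List.pyRange_one_eq_nil h]
    have h0 : max 0 (b - a) = 0 := by omega
    rw [h0, zero_mul]
    simp only [List.foldl_nil]
    split_ifs <;> omega
  · push Not at h
    have hlt : ((b - (a+1)).toNat) < ((b - a).toNat) := by omega
    rw [PySem.List.pyRange_one_cons h, List.foldl_cons]
    rw [outer_fold_eq p q ca cb (a+1) b]
    rw [inner_fold_eq p q ca cb a ca c0]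
    have hM : max 0 (b - a) = max 0 (b - (a+1)) + 1 := by omega
    rw [hM]
    have hd : (max 0 (b - (a+1)) + 1) * max 0 (cb - ca)
        = max 0 (b - (a+1)) * max 0 (cb - ca) + max 0 (cb - ca) := by ring
    rw [hd]
    split_ifs <;> omega
termination_by a b _ => (b - a).toNat

-- ===== VERDICT (by name: the statement is the Claim_ definition above) =====
theorem count_shared_cells_spec : Claim_equal_count_shared_cells := by
  intro M N p q _
  unfold Spec_count_shared_cells count_shared_cells count_shared_cells_alt
  simp only []
  rw [outer_fold_eq]
  have h1 : max 0 (min M (p+1) + 1 - max 1 (p-1)) = max 0 (min M (p+1) - max 1 (p-1) + 1) := by omega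
  have h2 : max 0 (min N (q+1) + 1 - max 1 (q-1)) = max 0 (min N (q+1) - max 1 (q-1) + 1) := by omega
  rw [h1, h2]
  split_ifs <;> omega
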